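-- pv_equiv track=rewrite | github.com/TonyKerguen/Python-1A | TP10/ecosysteme/ecosysteme.py | en_voie_disparition
-- ===== SOURCE A (Python) =====
-- def extinction_immediate(ecosysteme, animal):
--     """
--     renvoie True si animal s'éteint immédiatement dans l'écosystème faute
--     de nourriture
--     """
--     if ecosysteme[animal] is None:
--         return False
--     else:
--         return ecosysteme[animal] not in ecosysteme.keys() and ecosysteme[animal] != None
--
-- def en_voie_disparition(ecosysteme, animal):
--     """
--     renvoie True si animal s'éteint est voué à disparaitre à long terme
--     """
--     i = 0
--     while not extinction_immediate(ecosysteme, animal) and i < len(ecosysteme):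
--         animal = ecosysteme[animal]
--         i += 1
--         if animal is None:
--             return False
--     if extinction_immediate(ecosysteme, animal):
--         return True
--     else:
--         return False
-- ===== SOURCE B (Python) =====
-- def en_voie_disparition(ecosysteme, animal):
--     """
--     renvoie True si animal s'éteint est voué à disparaitre à long terme
--     """
--     if ecosysteme[animal] is None:
--         return False  # animal needs no prey: it survives
--     # Bottom-up fixpoint over the whole ecosystem: a species is doomed if its
--     # prey is a missing key, or (transitively) if its prey is doomed.
--     doomed = {a for a, p in ecosysteme.items() if p is not None and p not in ecosysteme}
--     for _ in range(len(ecosysteme)):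
--         doomed |= {a for a, p in ecosysteme.items() if p in doomed}
--     return animal in doomed
-- ===== Notes on version B (the rewrite author's own statement) =====
-- stated objective: alternative
-- what changed: Replaces A's pointer-chase along the food chain (counter-bounded walk with the extinction_immediate helper) by a global bottom-up fixpoint: build the set of ALL doomed species by seeding it with keys whose prey is a missing key and iterating 'add every key whose prey is doomed' len(ecosysteme) times, then answer by a membership test.
import Mathlib
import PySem

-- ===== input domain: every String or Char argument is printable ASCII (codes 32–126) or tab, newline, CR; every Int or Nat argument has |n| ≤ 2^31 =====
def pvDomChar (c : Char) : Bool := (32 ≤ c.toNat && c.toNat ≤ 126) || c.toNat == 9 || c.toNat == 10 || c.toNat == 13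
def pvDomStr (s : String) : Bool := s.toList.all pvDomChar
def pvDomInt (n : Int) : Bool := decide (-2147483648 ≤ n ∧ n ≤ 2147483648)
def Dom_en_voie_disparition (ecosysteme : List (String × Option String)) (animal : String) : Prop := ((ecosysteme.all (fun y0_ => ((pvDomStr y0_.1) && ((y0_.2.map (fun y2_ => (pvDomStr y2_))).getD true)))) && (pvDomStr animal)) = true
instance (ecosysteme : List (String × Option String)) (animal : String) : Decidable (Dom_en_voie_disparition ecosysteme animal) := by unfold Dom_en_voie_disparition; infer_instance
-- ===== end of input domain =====

-- B replaces A's counter-bounded walk along the food chain by a global bottom-up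
-- fixpoint: it computes the set of ALL doomed species and tests membership
-- (objective: alternative algorithm, no speed claim).

-- shared dict lookup: ecosysteme[x] as first-match association-list lookup
def lookupEco : List (String × Option String) → String → Option (Option String)
  | [], _ => none
  | (k, v) :: rest, a => if k = a then some v else lookupEco rest a

-- ===== PORT A =====
-- extinction_immediate; Python raises KeyError when animal is not a key (excluded by Pre_),
-- the port returns false there.
def extinction_immediate (ecosysteme : List (String × Option String)) (animal : String) : Bool :=
  match lookupEco ecosysteme animal with
  | none => false            -- KeyError in Python; outside Pre_
  | some none => false
  | some (some prey) => (lookupEco ecosysteme prey).isNone   -- prey not in keys (and prey ≠ None)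

-- the while loop: counter i, bound len(ecosysteme); exits returning extinction_immediate
def aLoop (ecosysteme : List (String × Option String)) (animal : String) (i : Nat) : Bool :=
  if extinction_immediate ecosysteme animal = false ∧ i < ecosysteme.length then
    match lookupEco ecosysteme animal with
    | some (some prey) => aLoop ecosysteme prey (i + 1)
    | _ => false             -- animal became None → return False (none: KeyError, outside Pre_)
  else
    extinction_immediate ecosysteme animal
termination_by ecosysteme.length - i

def en_voie_disparition (ecosysteme : List (String × Option String)) (animal : String) : Bool :=
  aLoop ecosysteme animal 0

-- ===== PORT B =====
-- {a for a, p in ecosysteme.items() if p is not None and p not in ecosysteme}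
def doomedInit (eco : List (String × Option String)) : PySem.Set String :=
  PySem.Set.ofList (eco.filterMap (fun kv =>
    match kv.2 with
    | some p => if (lookupEco eco p).isNone then some kv.1 else none
    | none => none))

-- doomed |= {a for a, p in ecosysteme.items() if p in doomed}
-- (the comprehension reads the OLD set d; its elements are added one by one)
def doomedStep (eco : List (String × Option String)) (d : PySem.Set String) : PySem.Set String :=
  eco.foldl (fun acc kv =>
    match kv.2 with
    | some p => if PySem.Set.contains d p then PySem.Set.add acc kv.1 else acc
    | none => acc) d

def en_voie_disparition_alt (ecosysteme : List (String × Option String)) (animal : String) : Bool :=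
  match lookupEco ecosysteme animal with
  | none => false        -- KeyError in Python; outside Pre_
  | some none => false   -- animal needs no prey: it survives
  | some (some _) =>
    PySem.Set.contains
      ((List.range ecosysteme.length).foldl (fun d _ => doomedStep ecosysteme d) (doomedInit ecosysteme))
      animal

-- ===== PRECONDITION & SPEC =====
-- Pre_ excludes exactly the inputs where the Python A raises KeyError (animal not a key);
-- the Nodup conjunct only states that ecosysteme is a Python dict (distinct keys) — it
-- excludes no Python input, since a dict cannot carry duplicate keys.
def Pre_en_voie_disparition (ecosysteme : List (String × Option String)) (animal : String) : Prop :=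
  animal ∈ ecosysteme.map Prod.fst ∧ (ecosysteme.map Prod.fst).Nodup
instance (ecosysteme : List (String × Option String)) (animal : String) : Decidable (Pre_en_voie_disparition ecosysteme animal) := by unfold Pre_en_voie_disparition; infer_instance
def pvWitness_en_voie_disparition : (List (String × Option String)) × String :=
  ([("lion", some "gazelle"), ("gazelle", some "herbe"), ("herbe", none)], "lion")

def Spec_en_voie_disparition (ecosysteme : List (String × Option String)) (animal : String) (out : Bool) : Prop := out = en_voie_disparition_alt ecosysteme animal
instance (ecosysteme : List (String × Option String)) (animal : String) (out : Bool) : Decidable (Spec_en_voie_disparition ecosysteme animal out) := by unfold Spec_en_voie_disparition; infer_instance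

-- ===== CLAIM (what is proved, stated in full; the proofs are below) =====
def Claim_equal_en_voie_disparition : Prop := ∀ (ecosysteme : List (String × Option String)) (animal : String), Dom_en_voie_disparition ecosysteme animal → Pre_en_voie_disparition ecosysteme animal → Spec_en_voie_disparition ecosysteme animal (en_voie_disparition ecosysteme animal)

-- ===== LEMMAS AND PROOFS =====

-- reference walk with explicit fuel: follow the chain, true iff a missing prey is reached
def walk (ecosysteme : List (String × Option String)) (animal : String) : Nat → Bool
  | 0 => false
  | fuel + 1 =>
    match lookupEco ecosysteme animal with
    | none => false
    | some none => false
    | some (some prey) =>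
      if (lookupEco ecosysteme prey).isNone then true
      else walk ecosysteme prey fuel

theorem walk_succ_iff (eco : List (String × Option String)) (a : String) (n : Nat) :
    walk eco a (n + 1) = true ↔
      ∃ p, lookupEco eco a = some (some p) ∧
        ((lookupEco eco p).isNone = true ∨ walk eco p n = true) := by
  rw [walk]
  cases hl : lookupEco eco a with
  | none => simp
  | some o =>
    cases o with
    | none => simp
    | some p =>
      by_cases hp : (lookupEco eco p).isNone = true
      · simp only [if_pos hp]
        constructor
        · intro _; exact ⟨p, rfl, Or.inl hp⟩
        · intro _; trivial
      · simp only [if_neg hp]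
        constructor
        · intro h; exact ⟨p, rfl, Or.inr h⟩
        · rintro ⟨q, hq, hcase⟩
          obtain rfl := Option.some.inj (Option.some.inj hq)
          rcases hcase with hc | hc
          · exact absurd hc hp
          · exact hc

theorem walk_mono (eco : List (String × Option String)) :
    ∀ (f : Nat) (a : String), walk eco a f = true → walk eco a (f + 1) = true := by
  intro f
  induction f with
  | zero => intro a h; simp [walk] at h
  | succ f ih =>
    intro a h
    rcases (walk_succ_iff eco a f).mp h with ⟨p, hl, hp⟩
    refine (walk_succ_iff eco a (f + 1)).mpr ⟨p, hl, ?_⟩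
    rcases hp with hp | hp
    · exact Or.inl hp
    · exact Or.inr (ih p hp)

-- with distinct keys, membership of a pair is exactly first-match lookup
theorem lookup_of_mem (eco : List (String × Option String))
    (hnd : (eco.map Prod.fst).Nodup) (a : String) (v : Option String)
    (h : (a, v) ∈ eco) : lookupEco eco a = some v := by
  induction eco with
  | nil => cases h
  | cons kv rest ih =>
    obtain ⟨k, w⟩ := kv
    simp only [List.map_cons, List.nodup_cons] at hnd
    rcases List.mem_cons.mp h with h | h
    · cases h; simp [lookupEco]
    · have hka : k ≠ a := by
        intro he
        apply hnd.1
        rw [he]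
        exact List.mem_map.mpr ⟨(a, v), h, rfl⟩
      simp only [lookupEco, if_neg hka]
      exact ih hnd.2 h

theorem mem_of_lookup (eco : List (String × Option String)) (a : String) (v : Option String)
    (h : lookupEco eco a = some v) : (a, v) ∈ eco := by
  induction eco with
  | nil => simp [lookupEco] at h
  | cons kv rest ih =>
    obtain ⟨k, w⟩ := kv
    by_cases hk : k = a
    · subst hk
      simp [lookupEco] at h
      subst h; exact List.mem_cons_self
    · simp only [lookupEco, if_neg hk] at h
      exact List.mem_cons_of_mem _ (ih h)

theorem mem_doomedInit (eco : List (String × Option String)) (x : String) :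
    x ∈ doomedInit eco ↔ ∃ p, (x, some p) ∈ eco ∧ (lookupEco eco p).isNone = true := by
  unfold doomedInit
  rw [PySem.Set.mem_ofList, List.mem_filterMap]
  constructor
  · rintro ⟨⟨k, v⟩, hmem, hf⟩
    cases v with
    | none => simp at hf
    | some p =>
      by_cases hp : (lookupEco eco p).isNone = true
      · simp only [if_pos hp, Option.some.injEq] at hf
        exact ⟨p, by simpa [hf] using hmem, hp⟩
      · simp [hp] at hf
  · rintro ⟨p, hmem, hp⟩
    exact ⟨(x, some p), hmem, by simp [hp]⟩

theorem mem_doomedStep (eco : List (String × Option String)) (d : PySem.Set String) (x : String) :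
    x ∈ doomedStep eco d ↔
      x ∈ d ∨ ∃ p, (x, some p) ∈ eco ∧ PySem.Set.contains d p = true := by
  unfold doomedStep
  suffices h : ∀ (l : List (String × Option String)) (acc : PySem.Set String),
      x ∈ l.foldl (fun acc kv =>
        match kv.2 with
        | some p => if PySem.Set.contains d p then PySem.Set.add acc kv.1 else acc
        | none => acc) acc ↔
      x ∈ acc ∨ ∃ p, (x, some p) ∈ l ∧ PySem.Set.contains d p = true from h eco d
  intro l
  induction l with
  | nil => intro acc; simp
  | cons kv rest ih =>
    intro acc
    obtain ⟨k, v⟩ := kv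
    cases v with
    | none =>
      rw [List.foldl_cons, ih]
      constructor
      · rintro (h | ⟨p, hp, hc⟩)
        · exact Or.inl h
        · exact Or.inr ⟨p, List.mem_cons_of_mem _ hp, hc⟩
      · rintro (h | ⟨p, hp, hc⟩)
        · exact Or.inl h
        · rcases List.mem_cons.mp hp with h' | h'
          · cases h'
          · exact Or.inr ⟨p, h', hc⟩
    | some q =>
      by_cases hq : PySem.Set.contains d q = true
      · rw [List.foldl_cons]
        simp only [hq, if_true]
        rw [ih]
        constructor
        · rintro (h | ⟨p, hp, hc⟩)
          · rcases (PySem.Set.mem_add acc k x).mp h with h | h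
            · exact Or.inl h
            · exact Or.inr ⟨q, by simp [h], hq⟩
          · exact Or.inr ⟨p, List.mem_cons_of_mem _ hp, hc⟩
        · rintro (h | ⟨p, hp, hc⟩)
          · exact Or.inl ((PySem.Set.mem_add acc k x).mpr (Or.inl h))
          · rcases List.mem_cons.mp hp with h' | h'
            · have : x = k := by cases h'; rfl
              exact Or.inl ((PySem.Set.mem_add acc k x).mpr (Or.inr this))
            · exact Or.inr ⟨p, h', hc⟩
      · rw [List.foldl_cons]
        simp only [hq]
        rw [ih]
        constructor
        · rintro (h | ⟨p, hp, hc⟩)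
          · exact Or.inl h
          · exact Or.inr ⟨p, List.mem_cons_of_mem _ hp, hc⟩
        · rintro (h | ⟨p, hp, hc⟩)
          · exact Or.inl h
          · rcases List.mem_cons.mp hp with h' | h'
            · have hpq : p = q := by cases h'; rfl
              subst hpq; exact absurd hc hq
            · exact Or.inr ⟨p, h', hc⟩

-- the fixpoint invariant: after k rounds the set holds exactly the animals whose
-- walk succeeds within k+1 steps
theorem iter_mem_iff (eco : List (String × Option String))
    (hnd : (eco.map Prod.fst).Nodup) :
    ∀ (k : Nat) (x : String),
      x ∈ (doomedStep eco)^[k] (doomedInit eco) ↔ walk eco x (k + 1) = true := by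
  intro k
  induction k with
  | zero =>
    intro x
    rw [Function.iterate_zero_apply, mem_doomedInit, walk_succ_iff]
    constructor
    · rintro ⟨p, hmem, hp⟩
      exact ⟨p, lookup_of_mem eco hnd x (some p) hmem, Or.inl hp⟩
    · rintro ⟨p, hl, hp | hp⟩
      · exact ⟨p, mem_of_lookup eco x (some p) hl, hp⟩
      · exact absurd hp (by simp [walk])
  | succ k ih =>
    intro x
    rw [Function.iterate_succ_apply', mem_doomedStep, walk_succ_iff]
    constructor
    · rintro (h | ⟨p, hmem, hc⟩)
      · rcases (walk_succ_iff eco x k).mp (ih x |>.mp h) with ⟨p, hl, hp | hp⟩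
        · exact ⟨p, hl, Or.inl hp⟩
        · exact ⟨p, hl, Or.inr (walk_mono eco k p hp)⟩
      · refine ⟨p, lookup_of_mem eco hnd x (some p) hmem, Or.inr ?_⟩
        exact (ih p).mp ((PySem.Set.contains_iff _ p).mp hc)
    · rintro ⟨p, hl, hp | hp⟩
      · refine Or.inl ((ih x).mpr ?_)
        refine (walk_succ_iff eco x k).mpr ⟨p, hl, Or.inl hp⟩
      · refine Or.inr ⟨p, mem_of_lookup eco x (some p) hl, ?_⟩
        exact (PySem.Set.contains_iff _ p).mpr ((ih p).mpr hp)

-- a fold over range that ignores its element is function iteration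
theorem foldl_const_iterate {α : Type} (f : α → α) :
    ∀ (l : List Nat) (d : α), l.foldl (fun d _ => f d) d = f^[l.length] d := by
  intro l
  induction l with
  | nil => intro d; rfl
  | cons a rest ih =>
    intro d
    rw [List.foldl_cons, ih, List.length_cons, Function.iterate_succ_apply]

-- aLoop equals the reference walk with fuel len - i + 1
theorem aLoop_eq_walk (eco : List (String × Option String)) :
    ∀ (j : Nat) (a : String) (i : Nat), i ≤ eco.length → j = eco.length - i →
      aLoop eco a i = walk eco a (j + 1) := by
  intro j
  induction j with
  | zero =>
    intro a i hle hj
    have hi : i = eco.length := by omega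
    rw [aLoop]
    have : ¬ (extinction_immediate eco a = false ∧ i < eco.length) := by omega
    rw [if_neg this, walk]
    cases hl : lookupEco eco a with
    | none => simp [extinction_immediate, hl]
    | some o =>
      cases o with
      | none => simp [extinction_immediate, hl]
      | some p =>
        by_cases hp : (lookupEco eco p).isNone
        · simp [extinction_immediate, hl, hp]
        · simp [extinction_immediate, hl, hp, walk]
  | succ j ih =>
    intro a i hle hj
    have hi : i < eco.length := by omega
    by_cases he : extinction_immediate eco a = false
    · rw [aLoop, if_pos ⟨he, hi⟩]
      cases hl : lookupEco eco a with
      | none =>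
        rw [walk, hl]
      | some o =>
        cases o with
        | none => rw [walk, hl]
        | some p =>
          have hp : (lookupEco eco p).isNone = false := by
            by_contra hc
            simp only [Bool.not_eq_false] at hc
            simp [extinction_immediate, hl, hc] at he
          have hstep : walk eco a (j + 1 + 1) = walk eco p (j + 1) := by
            rw [walk]; rw [hl]; simp [hp]
          rw [hstep]
          exact ih p (i + 1) (by omega) (by omega)
    · rw [aLoop, if_neg (by tauto)]
      simp only [Bool.not_eq_false] at he
      rw [walk]
      unfold extinction_immediate at he
      cases hl : lookupEco eco a with
      | none => rw [hl] at he; exact absurd he (by simp)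
      | some o =>
        cases o with
        | none => rw [hl] at he; exact absurd he (by simp)
        | some p =>
          rw [hl] at he
          simp [extinction_immediate, hl, he]

-- ===== VERDICT (by name: the statements are the Claim_ definitions above) =====
theorem en_voie_disparition_spec : Claim_equal_en_voie_disparition := by
  intro eco animal _ hpre
  unfold Spec_en_voie_disparition en_voie_disparition en_voie_disparition_alt
  rw [aLoop_eq_walk eco eco.length animal 0 (by omega) (by omega)]
  rw [foldl_const_iterate (doomedStep eco), List.length_range]
  cases hl : lookupEco eco animal with
  | none =>
    -- animal not a key: the walk fails at once
    rw [walk, hl]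
  | some o =>
    cases o with
    | none =>
      -- prey is None: the walk returns false at once
      rw [walk, hl]
    | some p =>
      rw [Bool.eq_iff_iff, PySem.Set.contains_iff]
      exact (iter_mem_iff eco hpre.2 eco.length animal).symm
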